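-- pv_equiv track=rewrite | github.com/Victoriapasta/Baekjoon-PS | Python/백준/Gold/16120. PPAP/PPAP.py | isPPAP
-- ===== SOURCE A (Python) =====
-- def isPPAP(string):
--     stack = []
--     for char in string:
--         stack.append(char)
--         if stack[-4:] == ['P', 'P', 'A', 'P']:
--             for _ in range(4):
--                 stack.pop()
--             stack.append('P')
--
--     if stack == ['P', 'P', 'A', 'P'] or stack == ['P']:
--         return 'PPAP'
--     else:
--         return 'NP'
-- ===== SOURCE B (Python) =====
-- def isPPAP(string):
--     while "PPAP" in string:
--         string = string.replace("PPAP", "P")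
--     return 'PPAP' if string == 'P' else 'NP'
-- ===== Notes on version B (the rewrite author's own statement) =====
-- stated objective: idiomatic
-- what changed: Replaced A's explicit per-character stack loop with a fixpoint of whole-string substitution (repeat str.replace of the pattern until it no longer occurs), relying on the rewrite system's unique normal form.
import Mathlib
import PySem

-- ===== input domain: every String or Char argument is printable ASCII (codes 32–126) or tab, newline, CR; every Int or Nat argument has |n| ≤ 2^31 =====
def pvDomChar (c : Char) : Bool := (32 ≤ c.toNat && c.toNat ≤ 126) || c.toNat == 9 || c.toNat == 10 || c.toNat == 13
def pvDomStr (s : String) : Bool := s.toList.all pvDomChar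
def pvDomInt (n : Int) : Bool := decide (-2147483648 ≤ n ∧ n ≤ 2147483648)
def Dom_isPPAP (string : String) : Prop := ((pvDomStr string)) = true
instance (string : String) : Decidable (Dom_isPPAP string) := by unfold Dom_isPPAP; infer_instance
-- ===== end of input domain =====

-- B replaces A's one-pass character stack by the idiomatic fixpoint `while "PPAP" in s: s = s.replace("PPAP","P")`;
-- both reach the unique normal form of the PPAP→P rewriting (proved below); not claimed faster.

-- ===== PORT A =====
-- one loop iteration of A: append the char, reduce a trailing "PPAP" to "P"
def isPPAPstep (stack : List Char) (char : Char) : List Char :=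
  let stack := stack ++ [char]
  if PySem.List.slice stack (some (-4)) none = ['P', 'P', 'A', 'P'] then
    -- for _ in range(4): stack.pop() ; stack.append('P')
    (stack.take (stack.length - 4)) ++ ['P']
  else stack

def isPPAP (string : String) : String :=
  let stack := string.toList.foldl isPPAPstep []
  if stack = ['P', 'P', 'A', 'P'] ∨ stack = ['P'] then "PPAP" else "NP"

-- ===== PORT B =====
-- helpers needed by altLoop's termination proof (cited in decreasing_by), hence above the port.
-- `rep l` = one pass of Python's l.replace("PPAP","P") (leftmost, non-overlapping)
def rep : List Char → List Char
  | [] => []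
  | c :: t =>
    if ['P', 'P', 'A', 'P'].isPrefixOf (c :: t) then 'P' :: rep (t.drop 3) else c :: rep t
termination_by l => l.length
decreasing_by
  · simp only [List.length_cons, List.length_drop]; omega
  · simp

theorem replace_eq_rep_go : ∀ (fuel : Nat) (l acc : List Char), l.length ≤ fuel →
    PySem.Chars.replace.go ['P', 'P', 'A', 'P'] ['P'] fuel l acc = acc.reverse ++ rep l := by
  intro fuel
  induction fuel with
  | zero =>
    intro l acc h
    have : l = [] := List.eq_nil_of_length_eq_zero (Nat.le_zero.mp h)
    subst this; simp [PySem.Chars.replace.go, rep]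
  | succ n ih =>
    intro l acc h
    cases l with
    | nil => simp [PySem.Chars.replace.go, rep]
    | cons c t =>
      rw [PySem.Chars.replace.go, rep]
      split
      · rename_i hp
        have hd : List.drop (List.length ['P', 'P', 'A', 'P']) (c :: t) = t.drop 3 := by simp
        rw [hd, ih (t.drop 3) _ (by simp only [List.length_cons] at h; simp only [List.length_drop]; omega)]
        simp
      · rw [ih t _ (by simp only [List.length_cons] at h; omega)]
        simp

theorem replace_eq_rep (l : List Char) :
    PySem.Chars.replace l ['P', 'P', 'A', 'P'] ['P'] = rep l := by
  rw [PySem.Chars.replace]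
  simp only [List.isEmpty_iff, reduceCtorEq, if_false]
  exact replace_eq_rep_go l.length l [] le_rfl

theorem rep_length_le (l : List Char) : (rep l).length ≤ l.length := by
  induction l using rep.induct with
  | case1 => simp [rep]
  | case2 c t hp ih =>
    rw [rep, if_pos hp]
    simp only [List.length_cons, List.length_drop] at ih ⊢
    omega
  | case3 c t hp ih =>
    rw [rep, if_neg hp]; simp only [List.length_cons]; omega

theorem rep_length_lt (l : List Char) (h : PySem.Chars.isIn ['P', 'P', 'A', 'P'] l = true) :
    (rep l).length < l.length := by
  rw [PySem.Chars.isIn_iff_infix] at h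
  induction l using rep.induct with
  | case1 => simp at h
  | case2 c t hp ih =>
    rw [rep, if_pos hp]
    have hle := rep_length_le (t.drop 3)
    have hlen : 4 ≤ (c :: t).length := (List.isPrefixOf_iff_prefix.mp hp).length_le
    simp only [List.length_cons, List.length_drop] at hle hlen ⊢
    omega
  | case3 c t hp ih =>
    rw [rep, if_neg hp]
    rcases List.infix_cons_iff.mp h with h1 | h2
    · exact absurd (List.isPrefixOf_iff_prefix.mpr h1) (by simpa using hp)
    · have := ih h2; simp only [List.length_cons]; omega

-- the port of B's while-loop: while "PPAP" in s: s = s.replace("PPAP", "P")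
def altLoop (s : List Char) : List Char :=
  if PySem.Chars.isIn ['P', 'P', 'A', 'P'] s then
    altLoop (PySem.Chars.replace s ['P', 'P', 'A', 'P'] ['P'])
  else s
termination_by s.length
decreasing_by
  rw [replace_eq_rep]; exact rep_length_lt s ‹_›

def isPPAP_alt (string : String) : String :=
  let s := altLoop string.toList
  if s = ['P'] then "PPAP" else "NP"

-- ===== PRECONDITION & SPEC =====
def Spec_isPPAP (string : String) (out : String) : Prop := out = isPPAP_alt string
instance (string : String) (out : String) : Decidable (Spec_isPPAP string out) := by unfold Spec_isPPAP; infer_instance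

-- ===== CLAIM (what is proved, stated in full; the proofs are below) =====
def Claim_equal_isPPAP : Prop := ∀ (string : String), Dom_isPPAP string → Spec_isPPAP string (isPPAP string)

-- ===== LEMMAS AND PROOFS =====

-- A's step, acting on the REVERSED stack
def stepRev (r : List Char) (c : Char) : List Char :=
  if c = 'P' ∧ r.take 3 = ['A', 'P', 'P'] then 'P' :: r.drop 3 else c :: r

theorem step_rev (t : List Char) (c : Char) :
    (isPPAPstep t c).reverse = stepRev t.reverse c := by
  unfold isPPAPstep stepRev
  have hsl : PySem.List.slice (t ++ [c]) (some (-4)) none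
      = (t ++ [c]).drop ((t ++ [c]).length - 4) := by
    simp [PySem.List.slice]
  have hdrop : (t ++ [c]).drop ((t ++ [c]).length - 4)
      = ((t ++ [c]).reverse.take 4).reverse := by
    rw [List.take_reverse, List.reverse_reverse]
  have hrev : (t ++ [c]).reverse = c :: t.reverse := by simp
  by_cases hc : c = 'P' ∧ t.reverse.take 3 = ['A', 'P', 'P']
  · obtain ⟨h1, h2⟩ := hc
    have htake : (t ++ [c]).reverse.take 4 = ['P', 'A', 'P', 'P'] := by
      rw [hrev, List.take_succ_cons, h2, h1]
    have hcond : PySem.List.slice (t ++ [c]) (some (-4)) none = ['P', 'P', 'A', 'P'] := by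
      rw [hsl, hdrop, htake]; rfl
    rw [if_pos hcond, if_pos ⟨h1, h2⟩]
    have hlen1 : (t ++ [c]).length = t.length + 1 := by simp
    have hlen : 4 ≤ (t ++ [c]).length := by
      have := congrArg List.length htake
      simp only [List.length_take, List.length_reverse, List.length_cons] at this
      omega
    rw [List.reverse_append]
    simp only [List.reverse_cons, List.reverse_nil, List.nil_append, List.singleton_append,
      List.cons.injEq, true_and]
    rw [List.reverse_take]
    have h4 : (t ++ [c]).length - ((t ++ [c]).length - 4) = 4 := by omega
    rw [h4, hrev, List.drop_succ_cons]
  · have hcond : PySem.List.slice (t ++ [c]) (some (-4)) none ≠ ['P', 'P', 'A', 'P'] := by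
      rw [hsl, hdrop, hrev]
      intro h
      apply hc
      have h' : (c :: t.reverse).take 4 = ['P', 'A', 'P', 'P'] := by
        have := congrArg List.reverse h
        simpa using this
      rw [List.take_succ_cons] at h'
      injection h' with hh ht
      exact ⟨hh, ht⟩
    rw [if_neg hcond, if_neg hc]
    exact hrev

theorem foldl_step_rev (l : List Char) : ∀ (t : List Char),
    (l.foldl isPPAPstep t).reverse = l.foldl stepRev t.reverse := by
  induction l with
  | nil => intro t; rfl
  | cons c l ih =>
    intro t
    simp only [List.foldl_cons]
    rw [ih, step_rev]

-- the key confluence fact: pushing P,P,A,P onto any stack = pushing a single P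
theorem key4 (r : List Char) :
    stepRev (stepRev (stepRev (stepRev r 'P') 'P') 'A') 'P' = stepRev r 'P' := by
  by_cases h : r.take 3 = ['A', 'P', 'P']
  · obtain ⟨rest, hr⟩ : ∃ rest, r = 'A' :: 'P' :: 'P' :: rest := by
      rcases r with _ | ⟨a, _ | ⟨b, _ | ⟨d, rest⟩⟩⟩ <;> simp_all
    subst hr
    have s1 : stepRev ('A' :: 'P' :: 'P' :: rest) 'P' = 'P' :: rest := by simp [stepRev]
    have s2 : stepRev ('P' :: rest) 'P' = 'P' :: 'P' :: rest := by simp [stepRev]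
    have s3 : stepRev ('P' :: 'P' :: rest) 'A' = 'A' :: 'P' :: 'P' :: rest := by simp [stepRev]
    rw [s1, s2, s3]; exact s1
  · have s1 : stepRev r 'P' = 'P' :: r := by simp [stepRev, h]
    have s2 : stepRev ('P' :: r) 'P' = 'P' :: 'P' :: r := by simp [stepRev]
    have s3 : stepRev ('P' :: 'P' :: r) 'A' = 'A' :: 'P' :: 'P' :: r := by simp [stepRev]
    have s4 : stepRev ('A' :: 'P' :: 'P' :: r) 'P' = 'P' :: r := by simp [stepRev]
    rw [s1, s2, s3, s4]

-- rep (one replace pass) does not change the final stack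
theorem fold_rep (l : List Char) : ∀ (r : List Char),
    (rep l).foldl stepRev r = l.foldl stepRev r := by
  induction l using rep.induct with
  | case1 => intro r; simp [rep]
  | case2 c t hp ih =>
    intro r
    obtain ⟨rest, hrest⟩ := List.isPrefixOf_iff_prefix.mp hp
    have hct : c :: t = 'P' :: 'P' :: 'A' :: 'P' :: rest := hrest.symm
    have ht : t.drop 3 = rest := by
      injection hct with _ h2
      rw [h2]; rfl
    rw [rep, if_pos hp, ht]
    rw [ht] at ih
    rw [hct]
    simp only [List.foldl_cons]
    rw [ih, key4]
  | case3 c t hp ih =>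
    intro r
    rw [rep, if_neg hp]
    simp only [List.foldl_cons]
    rw [ih]

-- a PPAP-free string is a fixpoint of the stack machine
theorem fold_free (l : List Char) : ∀ (pre : List Char),
    ¬ (['P', 'P', 'A', 'P'] <:+: (pre ++ l)) →
    l.foldl stepRev pre.reverse = (pre ++ l).reverse := by
  induction l with
  | nil => intro pre _; simp
  | cons c t ih =>
    intro pre hfree
    simp only [List.foldl_cons]
    have hstep : stepRev pre.reverse c = (pre ++ [c]).reverse := by
      unfold stepRev
      have hno : ¬ (c = 'P' ∧ pre.reverse.take 3 = ['A', 'P', 'P']) := by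
        rintro ⟨h1, h2⟩
        apply hfree
        have hpre : pre = (pre.reverse.drop 3).reverse ++ ['P', 'P', 'A'] := by
          conv_lhs => rw [← pre.reverse_reverse, ← List.take_append_drop 3 pre.reverse]
          rw [List.reverse_append, h2]
          rfl
        refine ⟨(pre.reverse.drop 3).reverse, t, ?_⟩
        rw [hpre, h1]
        simp
      rw [if_neg hno]; simp
    rw [hstep]
    have := ih (pre ++ [c]) (by simpa using hfree)
    simpa using this

theorem altLoop_spec (s : List Char) :
    (∀ r, (altLoop s).foldl stepRev r = s.foldl stepRev r) ∧
    PySem.Chars.isIn ['P', 'P', 'A', 'P'] (altLoop s) = false := by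
  induction s using altLoop.induct with
  | case1 s hin ih =>
    rw [altLoop, if_pos hin]
    refine ⟨fun r => ?_, ih.2⟩
    rw [ih.1 r, replace_eq_rep, fold_rep]
  | case2 s hin =>
    rw [altLoop, if_neg hin]
    exact ⟨fun _ => rfl, by simpa using hin⟩

-- ===== VERDICT (by name: the statement is the Claim_ definition above) =====
theorem isPPAP_spec : Claim_equal_isPPAP := by
  unfold Claim_equal_isPPAP Spec_isPPAP
  intro string _
  unfold isPPAP isPPAP_alt
  set l := string.toList with hl
  obtain ⟨hfold, hfree⟩ := altLoop_spec l
  have hstack : l.foldl isPPAPstep [] = altLoop l := by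
    have h1 : (l.foldl isPPAPstep []).reverse = l.foldl stepRev [] := by
      simpa using foldl_step_rev l []
    have h2 : (altLoop l).foldl stepRev [] = (altLoop l).reverse := by
      have := fold_free (altLoop l) []
      simp only [List.nil_append, List.reverse_nil] at this
      exact this (by rw [← PySem.Chars.isIn_eq_false_iff]; exact hfree)
    have h3 : (l.foldl isPPAPstep []).reverse = (altLoop l).reverse := by
      rw [h1, ← hfold [], h2]
    exact List.reverse_injective h3
  rw [hstack]
  have hne : altLoop l ≠ ['P', 'P', 'A', 'P'] := by
    intro h
    rw [h] at hfree
    exact absurd hfree (by decide)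
  by_cases hP : altLoop l = ['P']
  · rw [if_pos (Or.inr hP), if_pos hP]
  · rw [if_neg (by rintro (h | h); exacts [hne h, hP h]), if_neg hP]
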